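-- pv_equiv track=rewrite | github.com/chucheng/TwitterResearch | src/mixed_model.py | break_ties
-- ===== SOURCE A (Python) =====
-- def break_ties(mixed_rank_to_url_list):
--   """Breaks ties in rank when finding rankings for mixed model.
--
--   Keyword Argument:
--   mixed_rank_to_url_list -- A dictionary from rank to a list of
--                             (url, count) pairs for that rank.
--
--   Returns:
--   rankings - A list of (url, count) pairs representing the ranking w/ ties
--              broken.
--   """
--   prelim_rankings = sorted(mixed_rank_to_url_list.items(), key=lambda x: x[0])
--   rankings = []
--   for _, urls in prelim_rankings:
--     urls_sorted = sorted(urls, key=lambda x: x[1])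
--     for url in urls_sorted:
--       rankings.append(url)
--   return rankings
-- ===== SOURCE B (Python) =====
-- def break_ties(mixed_rank_to_url_list):
--   """One flat stable sort on the composite key (rank, count) instead of
--   sorting ranks and then each group separately."""
--   flat = [(rank, url)
--           for rank, urls in mixed_rank_to_url_list.items()
--           for url in urls]
--   flat.sort(key=lambda e: (e[0], e[1][1]))
--   return [url for _, url in flat]
-- ===== Notes on version B (the rewrite author's own statement) =====
-- stated objective: simpler
-- what changed: Replaces the outer sort-by-rank plus a per-group sort-by-count with one flat list of (rank, url) pairs and a single stable sort on the composite key (rank, count); stability reproduces A's tie order exactly.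
import Mathlib
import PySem

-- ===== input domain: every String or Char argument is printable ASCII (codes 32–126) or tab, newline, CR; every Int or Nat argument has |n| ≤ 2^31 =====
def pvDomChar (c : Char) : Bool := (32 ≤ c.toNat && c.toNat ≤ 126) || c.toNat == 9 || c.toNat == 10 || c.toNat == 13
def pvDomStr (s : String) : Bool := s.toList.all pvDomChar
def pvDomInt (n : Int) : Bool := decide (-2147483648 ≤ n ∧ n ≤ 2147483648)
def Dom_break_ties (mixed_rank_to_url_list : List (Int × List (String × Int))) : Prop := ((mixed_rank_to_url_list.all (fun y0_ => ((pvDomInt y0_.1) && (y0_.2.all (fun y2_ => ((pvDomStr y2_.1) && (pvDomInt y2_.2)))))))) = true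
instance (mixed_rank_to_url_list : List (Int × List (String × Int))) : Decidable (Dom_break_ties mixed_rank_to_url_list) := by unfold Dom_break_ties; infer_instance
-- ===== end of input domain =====

-- B replaces A's sort-by-rank + per-group sort-by-count with one flat stable sort on the
-- composite key (rank, count); objective: simpler (one sort instead of nested sorts).

-- ===== PORT A =====
def break_ties (mixed_rank_to_url_list : List (Int × List (String × Int))) : List (String × Int) :=
  let prelim_rankings := PySem.List.sorted mixed_rank_to_url_list (fun x => x.1) false
  prelim_rankings.foldl (fun rankings g =>
    let urls_sorted := PySem.List.sorted g.2 (fun x => x.2) false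
    urls_sorted.foldl (fun r url => r ++ [url]) rankings) []

-- ===== PORT B =====
def break_ties_alt (mixed_rank_to_url_list : List (Int × List (String × Int))) : List (String × Int) :=
  let flat := mixed_rank_to_url_list.flatMap (fun g => g.2.map (fun url => (g.1, url)))
  let s := PySem.List.sorted2 flat (fun e => e.1) (fun e => e.2.2) false
  s.map (fun e => e.2)

-- ===== PRECONDITION & SPEC =====
-- Pre_ requires the association list's keys to be distinct: the Python argument is a dict,
-- whose keys are necessarily distinct, so duplicate-key lists represent no Python input.
def Pre_break_ties (mixed_rank_to_url_list : List (Int × List (String × Int))) : Prop :=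
  (mixed_rank_to_url_list.map Prod.fst).Nodup
instance (mixed_rank_to_url_list : List (Int × List (String × Int))) : Decidable (Pre_break_ties mixed_rank_to_url_list) := by unfold Pre_break_ties; infer_instance

def pvWitness_break_ties : (List (Int × List (String × Int))) :=
  [(2, [("b", 1), ("a", 1)]), (1, [("c", 5), ("d", 3)])]

def Spec_break_ties (mixed_rank_to_url_list : List (Int × List (String × Int))) (out : List (String × Int)) : Prop := out = break_ties_alt mixed_rank_to_url_list
instance (mixed_rank_to_url_list : List (Int × List (String × Int))) (out : List (String × Int)) : Decidable (Spec_break_ties mixed_rank_to_url_list out) := by unfold Spec_break_ties; infer_instance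

-- ===== CLAIM (what is proved, stated in full; the proofs are below) =====
def Claim_equal_break_ties : Prop := ∀ (mixed_rank_to_url_list : List (Int × List (String × Int))), Dom_break_ties mixed_rank_to_url_list → Pre_break_ties mixed_rank_to_url_list → Spec_break_ties mixed_rank_to_url_list (break_ties mixed_rank_to_url_list)

-- ===== LEMMAS AND PROOFS =====

-- the comparator of B's composite-key sort (sorted2's lex `before` function)
def pvBt (a b : Int × (String × Int)) : Bool :=
  decide (a.1 < b.1) || (!decide (b.1 < a.1) && decide (a.2.2 < b.2.2))

-- the comparator of A's outer sort (key = rank)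
def pvBf (a b : Int × List (String × Int)) : Bool := decide (a.1 < b.1)

-- one group's contribution: its urls sorted by count, tagged with the rank
def pvBlk (r : Int) (us : List (String × Int)) : List (Int × (String × Int)) :=
  (PySem.List.sorted us (fun u => u.2) false).map (fun u => (r, u))

theorem pvSorted2_eq_foldl (xs : List (Int × (String × Int))) :
    PySem.List.sorted2 xs (fun e => e.1) (fun e => e.2.2) false
      = xs.foldl (fun acc x => PySem.List.insertBy pvBt x acc) [] := rfl

theorem pvInsertBy_map (r : Int) (u : String × Int) (l : List (String × Int)) :
    PySem.List.insertBy pvBt (r, u) (l.map (fun v => (r, v)))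
      = (PySem.List.insertBy (fun a b => decide ((a : String × Int).2 < b.2)) u l).map (fun v => (r, v)) := by
  induction l with
  | nil => rfl
  | cons x xs ih =>
      simp only [List.map_cons, PySem.List.insertBy]
      have : pvBt (r, u) (r, x) = decide (u.2 < x.2) := by
        simp [pvBt]
      rw [this]
      by_cases h : u.2 < x.2
      · simp [h]
      · simp [h, ih]

-- skip a prefix the new element does not go before
theorem pvInsert_skip {y : Int × (String × Int)} (c t : List (Int × (String × Int)))
    (h : ∀ x ∈ c, pvBt y x = false) :
    PySem.List.insertBy pvBt y (c ++ t) = c ++ PySem.List.insertBy pvBt y t := by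
  induction c with
  | nil => rfl
  | cons x xs ih =>
      have hx : pvBt y x = false := h x (by simp)
      simp only [List.cons_append, PySem.List.insertBy, hx, Bool.false_eq_true, if_false]
      rw [ih (fun z hz => h z (by simp [hz]))]

-- insertion stays in the left part when everything on the right is strictly after y
theorem pvInsert_stay {y : Int × (String × Int)} (m t : List (Int × (String × Int)))
    (h : ∀ x ∈ t, pvBt y x = true) :
    PySem.List.insertBy pvBt y (m ++ t) = PySem.List.insertBy pvBt y m ++ t := by
  induction m with
  | nil =>
      cases t with
      | nil => rfl
      | cons x xs =>
          have hx : pvBt y x = true := h x (by simp)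
          simp [PySem.List.insertBy, hx]
  | cons z m' ih =>
      simp only [List.cons_append, PySem.List.insertBy]
      by_cases hz : pvBt y z = true
      · simp [hz]
      · simp only [Bool.not_eq_true] at hz
        simp [hz, ih]

theorem pvBt_false_of_lt {y x : Int × (String × Int)} (h : x.1 < y.1) : pvBt y x = false := by
  simp [pvBt]; omega

theorem pvBt_true_of_lt {y x : Int × (String × Int)} (h : y.1 < x.1) : pvBt y x = true := by
  simp [pvBt, h]

-- inserting one url of rank r into the block decomposition
theorem pvInsert_one (ds₁ ds₂ : List (Int × List (String × Int))) (r : Int)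
    (h₁ : ∀ g ∈ ds₁, g.1 < r) (h₂ : ∀ g ∈ ds₂, r < g.1) (vs : List (String × Int)) (u : String × Int) :
    PySem.List.insertBy pvBt (r, u)
      ((ds₁.map (fun g => pvBlk g.1 g.2)).flatten ++ pvBlk r vs ++ (ds₂.map (fun g => pvBlk g.1 g.2)).flatten)
    = (ds₁.map (fun g => pvBlk g.1 g.2)).flatten ++ pvBlk r (vs ++ [u]) ++ (ds₂.map (fun g => pvBlk g.1 g.2)).flatten := by
  have hc : ∀ x ∈ (ds₁.map (fun g => pvBlk g.1 g.2)).flatten, pvBt (r, u) x = false := by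
    intro x hx
    simp only [List.mem_flatten, List.mem_map] at hx
    obtain ⟨b, ⟨g, hg, rfl⟩, hxb⟩ := hx
    obtain ⟨v, _, rfl⟩ := List.mem_map.mp hxb
    exact pvBt_false_of_lt (h₁ g hg)
  have ht : ∀ x ∈ (ds₂.map (fun g => pvBlk g.1 g.2)).flatten, pvBt (r, u) x = true := by
    intro x hx
    simp only [List.mem_flatten, List.mem_map] at hx
    obtain ⟨b, ⟨g, hg, rfl⟩, hxb⟩ := hx
    obtain ⟨v, _, rfl⟩ := List.mem_map.mp hxb
    exact pvBt_true_of_lt (h₂ g hg)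
  rw [List.append_assoc, pvInsert_skip _ _ hc, pvInsert_stay _ _ ht]
  have hblk : pvBlk r (vs ++ [u]) = (PySem.List.insertBy (fun a b => decide ((a : String × Int).2 < b.2)) u (PySem.List.sorted vs (fun v => v.2) false)).map (fun v => (r, v)) := by
    unfold pvBlk
    congr 1
    show PySem.List.sorted (vs ++ [u]) (fun v => v.2) false = _
    rw [PySem.List.sorted_eq_foldl_insertBy, PySem.List.sorted_eq_foldl_insertBy, List.foldl_append]
    rfl
  rw [hblk, ← pvInsertBy_map]
  simp [pvBlk, List.append_assoc]

-- folding a whole group's urls into the block decomposition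
theorem pvInsert_group (ds₁ ds₂ : List (Int × List (String × Int))) (r : Int)
    (h₁ : ∀ g ∈ ds₁, g.1 < r) (h₂ : ∀ g ∈ ds₂, r < g.1) (us vs : List (String × Int)) :
    (us.map (fun u => (r, u))).foldl (fun acc x => PySem.List.insertBy pvBt x acc)
      ((ds₁.map (fun g => pvBlk g.1 g.2)).flatten ++ pvBlk r vs ++ (ds₂.map (fun g => pvBlk g.1 g.2)).flatten)
    = (ds₁.map (fun g => pvBlk g.1 g.2)).flatten ++ pvBlk r (vs ++ us) ++ (ds₂.map (fun g => pvBlk g.1 g.2)).flatten := by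
  induction us generalizing vs with
  | nil => simp
  | cons u us ih =>
      simp only [List.map_cons, List.foldl_cons]
      rw [pvInsert_one ds₁ ds₂ r h₁ h₂ vs u, ih (vs ++ [u])]
      simp

-- splitting the insertion of a fresh rank into A's sorted group list
theorem pvInsertBf_split (ds : List (Int × List (String × Int))) (g : Int × List (String × Int))
    (hp : ds.Pairwise (fun a b => a.1 < b.1)) (hr : g.1 ∉ ds.map Prod.fst) :
    ∃ ds₁ ds₂, ds = ds₁ ++ ds₂ ∧ PySem.List.insertBy pvBf g ds = ds₁ ++ g :: ds₂ ∧
      (∀ x ∈ ds₁, x.1 < g.1) ∧ (∀ x ∈ ds₂, g.1 < x.1) := by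
  induction ds with
  | nil => exact ⟨[], [], rfl, rfl, by simp, by simp⟩
  | cons d ds ih =>
      simp only [List.map_cons, List.mem_cons, not_or] at hr
      rcases List.pairwise_cons.mp hp with ⟨hd, hp'⟩
      by_cases h : g.1 < d.1
      · refine ⟨[], d :: ds, rfl, ?_, by simp, ?_⟩
        · simp [PySem.List.insertBy, pvBf, h]
        · intro x hx
          rcases List.mem_cons.mp hx with rfl | hx
          · exact h
          · exact lt_trans h (hd x hx)
      · have hdg : d.1 < g.1 := by
          rcases lt_or_ge d.1 g.1 with h' | h'
          · exact h'
          · exact absurd (le_antisymm (le_of_not_gt h) h').symm hr.1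
        obtain ⟨ds₁, ds₂, he, hi, hl, hh⟩ := ih hp' hr.2
        refine ⟨d :: ds₁, ds₂, by simp [he], ?_, ?_, hh⟩
        · simp only [PySem.List.insertBy, pvBf]
          simp [h, hi]
        · intro x hx
          rcases List.mem_cons.mp hx with rfl | hx
          · exact hdg
          · exact hl x hx

theorem pvSortedA_pairwise (l : List (Int × List (String × Int)))
    (h : (l.map Prod.fst).Nodup) :
    (PySem.List.sorted l (fun x => x.1) false).Pairwise (fun a b => a.1 < b.1) := by
  have hperm : (PySem.List.sorted l (fun x => x.1) false).Perm l := PySem.List.sorted_perm l _ _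
  have hnd : ((PySem.List.sorted l (fun x => x.1) false).map Prod.fst).Nodup :=
    (hperm.map Prod.fst).nodup_iff.mpr h
  have hle := PySem.List.sorted_pairwise l (fun x => x.1)
  have := List.Pairwise.and hle ((List.pairwise_map).mp (List.Nodup.pairwise_of_forall_ne hnd (by intro a ha b hb hab; exact hab) |>.imp (fun h => h)))
  exact this.imp (fun ⟨hle, hne⟩ => lt_of_le_of_ne hle (by exact fun he => hne (by exact he)))

-- B's sort, characterised as A's block decomposition, for distinct ranks
theorem pvMain (l : List (Int × List (String × Int))) (h : (l.map Prod.fst).Nodup) :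
    (l.flatMap (fun g => g.2.map (fun u => (g.1, u)))).foldl (fun acc x => PySem.List.insertBy pvBt x acc) []
    = ((PySem.List.sorted l (fun x => x.1) false).map (fun g => pvBlk g.1 g.2)).flatten := by
  induction l using List.reverseRecOn with
  | nil => rfl
  | append_singleton l g ih =>
      have hsplit : (l.map Prod.fst).Nodup ∧ g.1 ∉ l.map Prod.fst := by
        simp only [List.map_append, List.map_cons, List.map_nil, List.nodup_append] at h
        exact ⟨h.1, fun hm => h.2.2 g.1 hm g.1 (by simp) rfl⟩
      have hD := pvSortedA_pairwise l hsplit.1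
      have hrD : g.1 ∉ (PySem.List.sorted l (fun x => x.1) false).map Prod.fst := by
        intro hm
        exact hsplit.2 (((PySem.List.sorted_perm l (fun x => x.1) false).map Prod.fst).mem_iff.mp hm)
      obtain ⟨ds₁, ds₂, he, hi, hl, hh⟩ := pvInsertBf_split _ g hD hrD
      have hsortedapp : PySem.List.sorted (l ++ [g]) (fun x => x.1) false
          = ds₁ ++ g :: ds₂ := by
        rw [PySem.List.sorted_eq_foldl_insertBy, List.foldl_append]
        rw [← PySem.List.sorted_eq_foldl_insertBy]
        simpa [pvBf] using hi
      rw [List.flatMap_append, List.foldl_append, ih hsplit.1, hsortedapp, he]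
      simp only [List.flatMap_cons, List.flatMap_nil, List.append_nil]
      have hnil : pvBlk g.1 [] = [] := rfl
      have hstate : ((ds₁ ++ ds₂).map (fun g => pvBlk g.1 g.2)).flatten
          = (ds₁.map (fun g => pvBlk g.1 g.2)).flatten ++ pvBlk g.1 []
            ++ (ds₂.map (fun g => pvBlk g.1 g.2)).flatten := by
        rw [hnil]
        simp [List.map_append, List.flatten_append]
      rw [hstate, pvInsert_group ds₁ ds₂ g.1 hl hh g.2 []]
      simp [List.map_append, List.flatten_append]

-- ===== VERDICT (by name: the statement is the Claim_ definition above) =====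
theorem break_ties_spec : Claim_equal_break_ties := by
  intro l _ hpre
  simp only [Spec_break_ties, break_ties, break_ties_alt]
  rw [pvSorted2_eq_foldl, pvMain l hpre]
  have hA : ∀ (P : List (Int × List (String × Int))) (init : List (String × Int)),
      P.foldl (fun rankings g =>
        (PySem.List.sorted g.2 (fun x => x.2) false).foldl (fun r url => r ++ [url]) rankings) init
      = init ++ (P.map (fun g => PySem.List.sorted g.2 (fun x => x.2) false)).flatten := by
    intro P
    induction P with
    | nil => simp
    | cons p P ih =>
        intro init
        simp only [List.foldl_cons, List.map_cons, List.flatten_cons]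
        rw [PySem.List.foldl_append_singleton_eq_self, ih, List.append_assoc]
  rw [hA]
  simp only [List.nil_append]
  rw [List.map_flatten, List.map_map]
  congr 1
  apply List.map_congr_left
  intro g _
  simp [pvBlk, List.map_map, Function.comp_def]
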